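-- pv_equiv track=rewrite | github.com/osome-iu/PluRule | eval/helpers.py | _build_user_map
-- ===== SOURCE A (Python) =====
-- from typing import List, Dict, Any, Tuple
--
-- def _build_user_map(submission: Dict[str, Any],
--                     thread: List[Dict[str, Any]]) -> Dict[str, str]:
--     """Build mapping from real usernames to anonymized labels."""
--     # Collect all unique authors
--     submission_author = submission.get('author', '[deleted]')
--
--     # Start with submission author as USER1
--     user_map = {submission_author: 'USER1'}
--
--     # Add other users in order of appearance
--     user_counter = 2
--     for comment in thread:
--         author = comment.get('author', '[deleted]')
--         if author not in user_map:
--             user_map[author] = f'USER{user_counter}'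
--             user_counter += 1
--
--     return user_map
-- ===== SOURCE B (Python) =====
-- def _build_user_map(submission, thread):
--     """Build mapping from real usernames to anonymized labels."""
--     authors = [submission.get('author', '[deleted]')] + \
--               [c.get('author', '[deleted]') for c in thread]
--     # First-occurrence position of every author: scan backwards and overwrite,
--     # so the surviving value is the earliest position (no membership test).
--     first = {}
--     for pos, name in reversed(list(enumerate(authors))):
--         first[name] = pos
--     # Rank authors by first appearance and label by rank.
--     ranked = sorted(first, key=first.get)
--     return {name: f'USER{r + 1}' for r, name in enumerate(ranked)}
-- ===== Notes on version B (the rewrite author's own statement) =====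
-- stated objective: alternative
-- what changed: Replaces A's single accumulate-with-counter-and-membership loop by an inverted-index pipeline: a backward overwrite scan records each author's first-occurrence position, the authors are then sorted by that position and labeled by rank.
import Mathlib
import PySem

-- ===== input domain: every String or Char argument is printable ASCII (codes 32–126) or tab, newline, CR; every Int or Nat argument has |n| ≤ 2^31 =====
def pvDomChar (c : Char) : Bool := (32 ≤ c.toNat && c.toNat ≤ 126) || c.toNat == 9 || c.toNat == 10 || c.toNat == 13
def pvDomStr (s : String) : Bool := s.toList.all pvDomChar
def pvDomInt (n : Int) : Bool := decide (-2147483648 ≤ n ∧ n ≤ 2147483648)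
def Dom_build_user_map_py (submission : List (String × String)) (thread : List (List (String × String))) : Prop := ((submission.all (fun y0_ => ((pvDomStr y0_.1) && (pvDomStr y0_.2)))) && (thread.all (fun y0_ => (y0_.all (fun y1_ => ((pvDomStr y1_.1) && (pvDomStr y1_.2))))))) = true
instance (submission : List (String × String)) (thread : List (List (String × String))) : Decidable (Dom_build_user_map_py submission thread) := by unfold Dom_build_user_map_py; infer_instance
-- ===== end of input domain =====

-- B replaces A's accumulate-with-counter loop by an inverted-index pipeline: a backward overwrite scan records first-occurrence positions, then authors are sorted by that position and labeled by rank (alternative algorithm, same result).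


-- ===== PORT A =====
-- literal transliteration of A: start user_map with the submission author as USER1,
-- then fold over the thread keeping (user_map, user_counter).
def build_user_map_py (submission : List (String × String)) (thread : List (List (String × String))) : List (String × String) :=
  let submission_author := (PySem.Dict.mk submission).getD "author" "[deleted]"
  let init : PySem.Dict String String × Int := (PySem.Dict.mk [(submission_author, "USER1")], 2)
  let res := thread.foldl (fun st comment =>
      let author := (PySem.Dict.mk comment).getD "author" "[deleted]"
      if st.1.contains author then st
      else (st.1.insert author ("USER" ++ PySem.Int.toStr st.2), st.2 + 1)) init
  res.1.items

-- ===== PORT B =====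
-- literal transliteration of B: authors list; a backward fold over reversed(list(enumerate(authors)))
-- overwriting first[name] = pos; ranked = sorted(first, key=first.get) — every iterated key is
-- present in `first`, so Python's first.get(k) is exactly its stored int, ported as getD k 0;
-- then label by rank.
def build_user_map_py_alt (submission : List (String × String)) (thread : List (List (String × String))) : List (String × String) :=
  let authors := ((PySem.Dict.mk submission).getD "author" "[deleted]") ::
                 thread.map (fun c => (PySem.Dict.mk c).getD "author" "[deleted]")
  let first := (PySem.List.enumerate authors 0).reverse.foldl
      (fun d p => d.insert p.2 p.1) (PySem.Dict.mk ([] : List (String × Int)))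
  let ranked := PySem.List.sorted first.keys (fun k => first.getD k 0)
  (PySem.List.enumerate ranked 0).map (fun p => (p.2, "USER" ++ PySem.Int.toStr (p.1 + 1)))

-- ===== PRECONDITION & SPEC =====
def Spec_build_user_map_py (submission : List (String × String)) (thread : List (List (String × String))) (out : List (String × String)) : Prop := out = build_user_map_py_alt submission thread
instance (submission : List (String × String)) (thread : List (List (String × String))) (out : List (String × String)) : Decidable (Spec_build_user_map_py submission thread out) := by unfold Spec_build_user_map_py; infer_instance

-- ===== CLAIM (what is proved, stated in full; the proofs are below) =====
def Claim_equal_build_user_map_py : Prop := ∀ (submission : List (String × String)) (thread : List (List (String × String))), Dom_build_user_map_py submission thread → Spec_build_user_map_py submission thread (build_user_map_py submission thread)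

-- ===== LEMMAS AND PROOFS =====

-- first-occurrence index of a in xs (none if absent)
def pvFIdx (a : String) : List String → Option Int
  | [] => none
  | x :: xs => if x = a then some 0 else (pvFIdx a xs).map (· + 1)

theorem pvFIdx_eq_none_iff (a : String) (xs : List String) : pvFIdx a xs = none ↔ a ∉ xs := by
  induction xs with
  | nil => simp [pvFIdx]
  | cons x xs ih =>
    by_cases h : x = a
    · simp [pvFIdx, h]
    · simp [pvFIdx, h, ih, Ne.symm h]

theorem pvFIdx_nonneg (a : String) (xs : List String) (n : Int) (h : pvFIdx a xs = some n) : 0 ≤ n := by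
  induction xs generalizing n with
  | nil => simp [pvFIdx] at h
  | cons x xs ih =>
    by_cases hx : x = a
    · simp [pvFIdx, hx] at h; omega
    · simp [pvFIdx, hx] at h
      obtain ⟨m, hm, rfl⟩ := h
      have := ih m hm; omega

-- the backward-overwrite fold computes the first-occurrence index
theorem pvFd_get? (xs : List String) (s : Int) (d : PySem.Dict String Int) (a : String) :
    ((PySem.List.enumerate xs s).reverse.foldl (fun d p => d.insert p.2 p.1) d).get? a
      = match pvFIdx a xs with
        | some n => some (s + n)
        | none => d.get? a := by
  induction xs generalizing s d with
  | nil => simp [PySem.List.enumerate, pvFIdx]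
  | cons x xs ih =>
    rw [PySem.List.enumerate_cons]
    simp only [List.reverse_cons, List.foldl_append, List.foldl_cons, List.foldl_nil]
    rw [PySem.Dict.get?_insert, ih]
    by_cases hx : x = a
    · subst hx
      simp [pvFIdx]
    · cases hfi : pvFIdx a xs with
      | none => simp [pvFIdx, hx, Ne.symm hx, hfi]
      | some n =>
        simp [pvFIdx, hx, Ne.symm hx, hfi]
        omega

theorem pvFd_nodup_keys (l : List (Int × String)) (d : PySem.Dict String Int) (h : d.keys.Nodup) :
    (l.foldl (fun d p => d.insert p.2 p.1) d).keys.Nodup := by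
  induction l generalizing d with
  | nil => exact h
  | cons p l ih => exact ih _ (PySem.Dict.nodup_keys_insert _ _ _ h)

-- dedup order is strictly increasing in first-occurrence index
theorem pvDedup_pairwise (xs : List String) :
    (PySem.Set.ofList xs).Pairwise (fun a b => (pvFIdx a xs).getD 0 < (pvFIdx b xs).getD 0) := by
  induction xs with
  | nil => simp [PySem.Set.ofList]
  | cons x xs ih =>
    rw [PySem.Set.ofList_cons]
    constructor
    · intro b hb
      have hbm : b ∈ PySem.Set.ofList xs ∧ ¬(b == x) = true := by
        simpa [PySem.Set.discard, List.mem_filter] using hb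
      have hbx : b ≠ x := by simpa using hbm.2
      have hbxs : b ∈ xs := (PySem.Set.mem_ofList xs b).mp hbm.1
      have : pvFIdx b xs ≠ none := by
        rw [Ne, pvFIdx_eq_none_iff]; exact fun h => h hbxs
      obtain ⟨n, hn⟩ := Option.ne_none_iff_exists'.mp this
      have hnn := pvFIdx_nonneg b xs n hn
      simp [pvFIdx, Ne.symm hbx, hn]
      omega
    · have hsub : (PySem.Set.discard (PySem.Set.ofList xs) x).Sublist (PySem.Set.ofList xs) := by
        simp only [PySem.Set.discard]; exact List.filter_sublist
      refine (List.Pairwise.sublist hsub ih).imp_of_mem ?_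
      intro a b ha hb hab
      obtain ⟨haxs, hax⟩ : a ∈ xs ∧ ¬a = x := by
        simpa [PySem.Set.discard, List.mem_filter, PySem.Set.mem_ofList] using ha
      obtain ⟨hbxs, hbx⟩ : b ∈ xs ∧ ¬b = x := by
        simpa [PySem.Set.discard, List.mem_filter, PySem.Set.mem_ofList] using hb
      have h1 : pvFIdx a xs ≠ none := by rw [Ne, pvFIdx_eq_none_iff]; exact fun h => h haxs
      have h2 : pvFIdx b xs ≠ none := by rw [Ne, pvFIdx_eq_none_iff]; exact fun h => h hbxs
      obtain ⟨n, hn⟩ := Option.ne_none_iff_exists'.mp h1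
      obtain ⟨m, hm⟩ := Option.ne_none_iff_exists'.mp h2
      simp [pvFIdx, Ne.symm hax, Ne.symm hbx, hn, hm]
      simp [hn, hm] at hab
      omega

-- the ranked list of B is exactly Python's ordered dedup of the authors list
theorem pvRanked_eq_dedup (xs : List String) :
    PySem.List.sorted
      ((PySem.List.enumerate xs 0).reverse.foldl (fun d p => d.insert p.2 p.1)
        (PySem.Dict.mk ([] : List (String × Int)))).keys
      (fun k => ((PySem.List.enumerate xs 0).reverse.foldl (fun d p => d.insert p.2 p.1)
        (PySem.Dict.mk ([] : List (String × Int)))).getD k 0)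
    = PySem.List.dedup xs := by
  set fd := (PySem.List.enumerate xs 0).reverse.foldl (fun d p => d.insert p.2 p.1)
      (PySem.Dict.mk ([] : List (String × Int))) with hfd
  have hget : ∀ a, fd.get? a = match pvFIdx a xs with
      | some n => some (0 + n) | none => none := by
    intro a
    rw [hfd, pvFd_get? xs 0 _ a]
    cases pvFIdx a xs <;> rfl
  have hmem : ∀ a, a ∈ fd.keys ↔ a ∈ xs := by
    intro a
    rw [← not_iff_not, ← PySem.Dict.get?_eq_none_iff_not_mem_keys, hget a, ← pvFIdx_eq_none_iff a xs]
    cases pvFIdx a xs <;> simp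
  have hnodup : fd.keys.Nodup := by
    rw [hfd]
    exact pvFd_nodup_keys _ _ (by simp [PySem.Dict.keys])
  rw [PySem.List.dedup_eq_ofList]
  apply PySem.List.sorted_eq_of_perm_of_pairwise_lt
  · rw [List.perm_ext_iff_of_nodup (PySem.Set.nodup_ofList xs) hnodup]
    intro a
    rw [hmem a, PySem.Set.mem_ofList]
  · refine (pvDedup_pairwise xs).imp_of_mem ?_
    intro a b ha hb hab
    have haxs : a ∈ xs := (PySem.Set.mem_ofList xs a).mp ha
    have hbxs : b ∈ xs := (PySem.Set.mem_ofList xs b).mp hb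
    have h1 : pvFIdx a xs ≠ none := by rw [Ne, pvFIdx_eq_none_iff]; exact fun h => h haxs
    have h2 : pvFIdx b xs ≠ none := by rw [Ne, pvFIdx_eq_none_iff]; exact fun h => h hbxs
    obtain ⟨n, hn⟩ := Option.ne_none_iff_exists'.mp h1
    obtain ⟨m, hm⟩ := Option.ne_none_iff_exists'.mp h2
    simp [hn, hm] at hab
    simp [PySem.Dict.getD, hget, hn, hm]
    omega

-- the dict A has built after having seen exactly the distinct authors u (in order)
def pvLabel (u : List String) : PySem.Dict String String :=
  PySem.Dict.mk ((PySem.List.enumerate u).map (fun p => (p.2, "USER" ++ PySem.Int.toStr (p.1 + 1))))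

theorem pvLabel_keys (u : List String) : (pvLabel u).keys = u := by
  simp [pvLabel, PySem.Dict.keys, List.map_map, Function.comp_def]

theorem pvLabel_contains (u : List String) (a : String) :
    (pvLabel u).contains a = decide (a ∈ u) := by
  rw [PySem.Dict.contains_eq_decide_mem_keys, pvLabel_keys]

theorem pvLabel_append (u : List String) (a : String) (h : a ∉ u) :
    (pvLabel u).insert a ("USER" ++ PySem.Int.toStr ((u.length : Int) + 1)) = pvLabel (u ++ [a]) := by
  have hc : (pvLabel u).contains a = false := by simp [pvLabel_contains, h]
  apply PySem.Dict.ext_iff.mpr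
  rw [PySem.Dict.items_insert_of_not_contains _ _ hc]
  simp [pvLabel, PySem.List.enumerate_append, PySem.List.enumerate]

theorem pvLoop (l : List String) (u : List String) :
    l.foldl (fun st a =>
        if (st : PySem.Dict String String × Int).1.contains a then st
        else (st.1.insert a ("USER" ++ PySem.Int.toStr st.2), st.2 + 1))
      (pvLabel u, (u.length : Int) + 1)
    = (pvLabel (PySem.Set.update u l), ((PySem.Set.update u l).length : Int) + 1) := by
  induction l generalizing u with
  | nil => simp [PySem.Set.update]
  | cons a l ih =>
    by_cases h : a ∈ u
    · have hadd : PySem.Set.add u a = u := by simp [PySem.Set.add, h]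
      simp only [List.foldl_cons, pvLabel_contains, h, decide_true, if_true]
      simpa [PySem.Set.update, hadd] using ih u
    · have hadd : PySem.Set.add u a = u ++ [a] := by simp [PySem.Set.add, h]
      simp only [List.foldl_cons, pvLabel_contains, h, decide_false]
      rw [pvLabel_append u a h]
      have hl : ((u ++ [a]).length : Int) = (u.length : Int) + 1 := by simp
      rw [show ((u.length : Int) + 1 + 1) = ((u ++ [a]).length : Int) + 1 by omega]
      simpa [PySem.Set.update, hadd] using ih (u ++ [a])

-- rewriting A's fold over comments as a fold over their extracted authors
theorem pvFoldMap (thread : List (List (String × String))) (init : PySem.Dict String String × Int) :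
    thread.foldl (fun st comment =>
      if st.1.contains ((PySem.Dict.mk comment).getD "author" "[deleted]") then st
      else (st.1.insert ((PySem.Dict.mk comment).getD "author" "[deleted]") ("USER" ++ PySem.Int.toStr st.2), st.2 + 1)) init
    = (thread.map (fun c => (PySem.Dict.mk c).getD "author" "[deleted]")).foldl (fun st a =>
        if st.1.contains a then st
        else (st.1.insert a ("USER" ++ PySem.Int.toStr st.2), st.2 + 1)) init := by
  induction thread generalizing init with
  | nil => rfl
  | cons c t ih => simp only [List.foldl_cons, List.map_cons]; exact ih _

-- ===== VERDICT (by name: the statement is the Claim_ definition above) =====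
theorem build_user_map_py_spec : Claim_equal_build_user_map_py := by
  intro submission thread _
  simp only [Spec_build_user_map_py, build_user_map_py, build_user_map_py_alt]
  rw [pvFoldMap, pvRanked_eq_dedup]
  have hinit : ((PySem.Dict.mk [((PySem.Dict.mk submission).getD "author" "[deleted]", "USER1")], (2 : Int)))
      = (pvLabel [(PySem.Dict.mk submission).getD "author" "[deleted]"],
         (([(PySem.Dict.mk submission).getD "author" "[deleted]"] : List String).length : Int) + 1) := by
    simp [pvLabel, PySem.List.enumerate]
    decide
  rw [hinit, pvLoop]
  have hded : PySem.List.dedup ((PySem.Dict.mk submission).getD "author" "[deleted]"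
        :: thread.map (fun c => (PySem.Dict.mk c).getD "author" "[deleted]"))
      = PySem.Set.update [(PySem.Dict.mk submission).getD "author" "[deleted]"]
          (thread.map (fun c => (PySem.Dict.mk c).getD "author" "[deleted]")) := by
    simp [PySem.List.dedup, PySem.Set.ofList_eq_foldl, PySem.Set.update, PySem.Set.add]
  rw [hded]
  rfl
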